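-- pv_equiv track=rewrite | github.com/MiyamotoAkira/kata_bowling_scorer | bowling/bowling_scorer.py | get_frame
-- ===== SOURCE A (Python) =====
-- def get_frame(line):
--     current_frame = 0
--     half_frame = False
--     for roll in line:
--         if roll == 'X':
--             current_frame += 1
--         else:
--             if half_frame:
--                 half_frame = False
--             else:
--                 current_frame += 1
--                 half_frame = True
--
--     return current_frame
-- ===== SOURCE B (Python) =====
-- def get_frame(line):
--     x = line.count('X')
--     other = len(line) - x
--     return x + (other + 1) // 2
-- ===== Notes on version B (the rewrite author's own statement) =====
-- stated objective: simpler
-- what changed: Replaces the iterative half_frame toggle loop with a closed-form count: frames = (#'X' rolls) + ceil(#other rolls / 2), since non-'X' rolls pair up regardless of where the 'X's fall.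
import Mathlib
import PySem

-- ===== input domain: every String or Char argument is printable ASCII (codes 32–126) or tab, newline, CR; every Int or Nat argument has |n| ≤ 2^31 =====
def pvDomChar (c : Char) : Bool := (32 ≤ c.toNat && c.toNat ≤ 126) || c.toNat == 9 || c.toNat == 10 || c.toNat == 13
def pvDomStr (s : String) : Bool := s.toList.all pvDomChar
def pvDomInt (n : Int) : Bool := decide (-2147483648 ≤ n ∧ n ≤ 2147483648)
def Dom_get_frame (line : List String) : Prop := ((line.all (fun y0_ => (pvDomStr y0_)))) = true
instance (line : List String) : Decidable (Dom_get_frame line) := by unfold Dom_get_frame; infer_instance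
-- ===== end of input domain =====

-- B replaces the half_frame toggle loop with a closed form: frames = #X + ceil(#non-X / 2) (simpler).
-- ===== PORT A =====
-- loop state: (current_frame, half_frame)
def get_frame (line : List String) : Int :=
  (line.foldl (fun (st : Int × Bool) roll =>
      if roll == "X" then (st.1 + 1, st.2)
      else if st.2 then (st.1, false)
      else (st.1 + 1, true))
    ((0 : Int), false)).1

-- ===== PORT B =====
def get_frame_alt (line : List String) : Int :=
  let x : Int := PySem.List.count line "X"
  let other : Int := (line.length : Int) - x
  x + PySem.Int.floordiv (other + 1) 2

-- ===== PRECONDITION & SPEC =====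
def Spec_get_frame (line : List String) (out : Int) : Prop := out = get_frame_alt line
instance (line : List String) (out : Int) : Decidable (Spec_get_frame line out) := by unfold Spec_get_frame; infer_instance

-- ===== CLAIM (what is proved, stated in full; the proofs are below) =====
def Claim_equal_get_frame : Prop := ∀ (line : List String), Dom_get_frame line → Spec_get_frame line (get_frame line)

-- ===== LEMMAS AND PROOFS =====

-- ===== VERDICT (by name: the statement is the Claim_ definition above) =====
theorem get_frame_loop (line : List String) (cf : Int) (hf : Bool) :
    (line.foldl (fun (st : Int × Bool) roll =>
        if roll == "X" then (st.1 + 1, st.2)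
        else if st.2 then (st.1, false)
        else (st.1 + 1, true)) (cf, hf)).1
      = cf + (line.count "X" : Int)
        + (let o : Int := (line.length : Int) - (line.count "X" : Int);
           if hf then o / 2 else (o + 1) / 2) := by
  induction line generalizing cf hf with
  | nil => simp
  | cons r t ih =>
    by_cases hx : r = "X"
    · subst hx
      simp only [List.foldl_cons, beq_self_eq_true, if_true, ih]
      simp [List.count_cons]
      omega
    · have hb : (r == "X") = false := beq_eq_false_iff_ne.mpr hx
      cases hf with
      | true =>
        simp only [List.foldl_cons, hb, Bool.false_eq_true, if_false, if_true, ih]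
        simp [hx]
        omega
      | false =>
        simp only [List.foldl_cons, hb, Bool.false_eq_true, if_false, ih]
        simp [hx]
        omega

theorem get_frame_spec : Claim_equal_get_frame := by
  intro line _
  unfold Spec_get_frame get_frame get_frame_alt
  rw [get_frame_loop]
  have h : (List.count "X" line : Int) ≤ (line.length : Int) := by
    exact_mod_cast List.count_le_length
  simp only [PySem.List.count, PySem.Int.floordiv, if_neg (by decide : ¬ (false = true))]
  have h2 : ((line.length : Int) - (List.count "X" line) + 1).fdiv 2
      = ((line.length : Int) - (List.count "X" line) + 1) / 2 :=
    Int.fdiv_eq_ediv_of_nonneg _ (by decide)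
  rw [h2]
  omega
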